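-- pv_equiv track=rewrite | github.com/CTurE1/x-internal-api | scripts/notify_drift.py | _diff_ops
-- ===== SOURCE A (Python) =====
-- from typing import Any
--
-- def _diff_ops(prev: dict[str, Any], cur: dict[str, Any]) -> dict[str, list[str]]:
--     """Return what changed at the queryId/method/presence level."""
--     prev_ops = prev.get("ops", {})
--     cur_ops = cur.get("ops", {})
--
--     changed: list[str] = []
--     method_changed: list[str] = []
--     removed: list[str] = []
--     added: list[str] = []
--
--     for name in sorted(set(prev_ops) | set(cur_ops)):
--         p = prev_ops.get(name)
--         c = cur_ops.get(name)
--         if p and not c: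
--             removed.append(name)
--         elif c and not p:
--             added.append(name)
--         elif p and c:
--             if p.get("queryId") != c.get("queryId"):
--                 changed.append(f"{name}: {p.get('queryId')} -> {c.get('queryId')}")
--             if p.get("method") != c.get("method"):
--                 method_changed.append(f"{name}: {p.get('method')} -> {c.get('method')}")
--
--     return {
--         "queryId_changed": changed,
--         "method_changed": method_changed,
--         "removed": removed,
--         "added": added,
--     }
-- ===== SOURCE B (Python) =====
-- def _diff_ops(prev, cur):
--     """Return what changed at the queryId/method/presence level."""
--     prev_ops = prev.get("ops", {})
--     cur_ops = cur.get("ops", {})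
--
--     prev_live = {n for n in prev_ops if prev_ops[n]}
--     cur_live = {n for n in cur_ops if cur_ops[n]}
--
--     removed = sorted(prev_live - cur_live)
--     added = sorted(cur_live - prev_live)
--     common = sorted(prev_live & cur_live)
--
--     return {
--         "queryId_changed": [
--             f"{n}: {prev_ops[n].get('queryId')} -> {cur_ops[n].get('queryId')}"
--             for n in common
--             if prev_ops[n].get("queryId") != cur_ops[n].get("queryId")
--         ],
--         "method_changed": [
--             f"{n}: {prev_ops[n].get('method')} -> {cur_ops[n].get('method')}"
--             for n in common
--             if prev_ops[n].get("method") != cur_ops[n].get("method")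
--         ],
--         "removed": removed,
--         "added": added,
--     }
-- ===== Notes on version B (the rewrite author's own statement) =====
-- stated objective: simpler
-- what changed: Replaces A's single loop over the sorted key union with four accumulator lists by a set-algebra decomposition: compute the truthy-key sets once, obtain removed/added as sorted set differences and the changed lists as comprehensions over the sorted intersection.
import Mathlib
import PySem

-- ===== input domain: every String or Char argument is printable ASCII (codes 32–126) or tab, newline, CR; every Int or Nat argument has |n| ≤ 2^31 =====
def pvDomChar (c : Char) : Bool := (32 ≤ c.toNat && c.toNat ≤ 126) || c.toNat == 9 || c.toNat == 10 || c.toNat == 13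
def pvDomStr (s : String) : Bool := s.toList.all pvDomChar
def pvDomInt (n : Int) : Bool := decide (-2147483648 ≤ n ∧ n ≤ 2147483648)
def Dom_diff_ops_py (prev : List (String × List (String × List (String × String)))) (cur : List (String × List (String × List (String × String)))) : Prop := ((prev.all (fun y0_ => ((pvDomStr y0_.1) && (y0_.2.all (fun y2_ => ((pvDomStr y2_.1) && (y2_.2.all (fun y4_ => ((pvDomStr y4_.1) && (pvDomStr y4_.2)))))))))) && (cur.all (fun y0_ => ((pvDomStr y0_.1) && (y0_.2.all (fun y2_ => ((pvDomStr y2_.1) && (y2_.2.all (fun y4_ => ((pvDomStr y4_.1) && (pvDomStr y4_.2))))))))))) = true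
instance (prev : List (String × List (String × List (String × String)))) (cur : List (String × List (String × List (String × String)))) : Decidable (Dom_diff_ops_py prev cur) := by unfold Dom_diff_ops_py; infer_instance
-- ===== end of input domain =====

-- B replaces A's single four-accumulator loop over the sorted key union by a set-algebra
-- decomposition (truthy-key sets, sorted set differences / intersection); objective: simpler.

-- shared dict-access helpers (both Pythons read the dicts the same way)
-- first-match lookup on an association list (= dict lookup under the type convention)
def pvLook {α : Type} (d : List (String × α)) (k : String) : Option α :=
  (PySem.Dict.mk d).get? k

-- Python truthiness of `d.get(name)`: present with a non-empty dict value
def pvTruthy {α : Type} (o : Option (List α)) : Bool :=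
  match o with
  | some l => !l.isEmpty
  | none => false

-- str(x) for x an Optional[str], as the f-string renders it
def pvOptStr (o : Option String) : String :=
  match o with
  | some s => s
  | none => "None"

-- f"{name}: {p} -> {c}"
def pvFmt (name : String) (p c : Option String) : String :=
  name ++ ": " ++ pvOptStr p ++ " -> " ++ pvOptStr c

-- ===== PORT A =====
-- the body of A's `for name in sorted(...)` loop (state = (changed, method_changed, removed, added))
def pvStepA (prev_ops cur_ops : List (String × List (String × String)))
    (st : List String × List String × List String × List String) (name : String) :
    List String × List String × List String × List String :=
  let p := pvLook prev_ops name
  let c := pvLook cur_ops name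
  if pvTruthy p && !pvTruthy c then
    (st.1, st.2.1, st.2.2.1 ++ [name], st.2.2.2)
  else if pvTruthy c && !pvTruthy p then
    (st.1, st.2.1, st.2.2.1, st.2.2.2 ++ [name])
  else if pvTruthy p && pvTruthy c then
    -- p and c are `some _` here, so `.getD []` is exact for Python's p.get(...)
    let pq := pvLook (p.getD []) "queryId"
    let cq := pvLook (c.getD []) "queryId"
    let pm := pvLook (p.getD []) "method"
    let cm := pvLook (c.getD []) "method"
    ((if pq ≠ cq then st.1 ++ [pvFmt name pq cq] else st.1),
     (if pm ≠ cm then st.2.1 ++ [pvFmt name pm cm] else st.2.1),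
     st.2.2.1, st.2.2.2)
  else st

def diff_ops_py (prev : List (String × List (String × List (String × String)))) (cur : List (String × List (String × List (String × String)))) : List (String × List String) :=
  let prev_ops := (PySem.Dict.mk prev).getD "ops" []
  let cur_ops := (PySem.Dict.mk cur).getD "ops" []
  let names := PySem.List.sorted
    (PySem.Set.union (PySem.Set.ofList (prev_ops.map (·.1))) (cur_ops.map (·.1)))
    (fun x => x)
  let st := names.foldl (pvStepA prev_ops cur_ops)
    (([] : List String), ([] : List String), ([] : List String), ([] : List String))
  [("queryId_changed", st.1), ("method_changed", st.2.1),
   ("removed", st.2.2.1), ("added", st.2.2.2)]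

-- ===== PORT B =====
def diff_ops_py_alt (prev : List (String × List (String × List (String × String)))) (cur : List (String × List (String × List (String × String)))) : List (String × List String) :=
  let prev_ops := (PySem.Dict.mk prev).getD "ops" []
  let cur_ops := (PySem.Dict.mk cur).getD "ops" []
  -- {n for n in prev_ops if prev_ops[n]} : set of the truthy keys, in iteration order
  let prev_live := PySem.Set.ofList
    (((PySem.Dict.mk prev_ops).keys).filter (fun n => pvTruthy (pvLook prev_ops n)))
  let cur_live := PySem.Set.ofList
    (((PySem.Dict.mk cur_ops).keys).filter (fun n => pvTruthy (pvLook cur_ops n)))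
  let removed := PySem.List.sorted (PySem.Set.diff prev_live cur_live) (fun x => x)
  let added := PySem.List.sorted (PySem.Set.diff cur_live prev_live) (fun x => x)
  let common := PySem.List.sorted (PySem.Set.inter prev_live cur_live) (fun x => x)
  -- prev_ops[n] for n ∈ common is always present, so `.getD []` is exact
  let qid := fun (ops : List (String × List (String × String))) (n : String) =>
    pvLook ((pvLook ops n).getD []) "queryId"
  let mth := fun (ops : List (String × List (String × String))) (n : String) =>
    pvLook ((pvLook ops n).getD []) "method"
  [("queryId_changed",
     (common.filter (fun n => qid prev_ops n ≠ qid cur_ops n)).map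
       (fun n => pvFmt n (qid prev_ops n) (qid cur_ops n))),
   ("method_changed",
     (common.filter (fun n => mth prev_ops n ≠ mth cur_ops n)).map
       (fun n => pvFmt n (mth prev_ops n) (mth cur_ops n))),
   ("removed", removed), ("added", added)]

-- ===== PRECONDITION & SPEC =====
def Spec_diff_ops_py (prev : List (String × List (String × List (String × String)))) (cur : List (String × List (String × List (String × String)))) (out : List (String × List String)) : Prop := out = diff_ops_py_alt prev cur
instance (prev : List (String × List (String × List (String × String)))) (cur : List (String × List (String × List (String × String)))) (out : List (String × List String)) : Decidable (Spec_diff_ops_py prev cur out) := by unfold Spec_diff_ops_py; infer_instance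

-- ===== CLAIM (what is proved, stated in full; the proofs are below) =====
def Claim_equal_diff_ops_py : Prop := ∀ (prev : List (String × List (String × List (String × String)))) (cur : List (String × List (String × List (String × String)))), Dom_diff_ops_py prev cur → Spec_diff_ops_py prev cur (diff_ops_py prev cur)

-- ===== LEMMAS AND PROOFS =====

-- abbreviations for the truthiness / field tests both programs perform
def pvPt (po : List (String × List (String × String))) (n : String) : Bool :=
  pvTruthy (pvLook po n)

def pvQ (po : List (String × List (String × String))) (n : String) : Option String :=
  pvLook ((pvLook po n).getD []) "queryId"

def pvM (po : List (String × List (String × String))) (n : String) : Option String :=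
  pvLook ((pvLook po n).getD []) "method"

-- a truthy lookup implies the key occurs
theorem pvPt_mem (po : List (String × List (String × String))) (n : String)
    (h : pvPt po n = true) : n ∈ po.map (fun x => x.1) := by
  by_contra hmem
  have hnone : (PySem.Dict.mk po).get? n = none := by
    rw [PySem.Dict.get?_eq_none_iff_not_mem_keys]
    simpa [PySem.Dict.keys_mk] using hmem
  simp [pvPt, pvLook, hnone, pvTruthy] at h

-- A's loop unrolled: the four accumulators are independent filters/maps of the name list
theorem pvFoldA (po co : List (String × List (String × String))) (ns : List String)
    (acc : List String × List String × List String × List String) :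
    ns.foldl (pvStepA po co) acc =
      (acc.1 ++ (ns.filter (fun n => pvPt po n && pvPt co n && decide (pvQ po n ≠ pvQ co n))).map
          (fun n => pvFmt n (pvQ po n) (pvQ co n)),
       acc.2.1 ++ (ns.filter (fun n => pvPt po n && pvPt co n && decide (pvM po n ≠ pvM co n))).map
          (fun n => pvFmt n (pvM po n) (pvM co n)),
       acc.2.2.1 ++ ns.filter (fun n => pvPt po n && !pvPt co n),
       acc.2.2.2 ++ ns.filter (fun n => pvPt co n && !pvPt po n)) := by
  induction ns generalizing acc with
  | nil => simp
  | cons x ns ih =>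
    rw [List.foldl_cons, ih]
    by_cases hp : pvPt po x = true <;> by_cases hc : pvPt co x = true <;>
      simp only [pvStepA, pvPt, pvQ, pvM] at hp hc ⊢ <;>
      simp [hp, hc, List.filter_cons] <;>
      split_ifs <;>
      simp_all [List.append_assoc]

-- the sorted union is strictly increasing
theorem pvU_pairwise (a b : List String) :
    (PySem.List.sorted (PySem.Set.union (PySem.Set.ofList a) b) (fun x => x)).Pairwise (· < ·) := by
  have hu : PySem.Set.union (PySem.Set.ofList a) b = PySem.Set.ofList (a ++ b) := by
    simp [PySem.Set.union, PySem.Set.ofList_append]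
  rw [hu]
  exact PySem.List.sorted_ofList_pairwise_lt (a ++ b)

theorem pvU_nodup (a b : List String) :
    (PySem.List.sorted (PySem.Set.union (PySem.Set.ofList a) b) (fun x => x)).Nodup :=
  (pvU_pairwise a b).imp (fun h => ne_of_lt h)

theorem pvU_mem (a b : List String) (n : String) :
    n ∈ PySem.List.sorted (PySem.Set.union (PySem.Set.ofList a) b) (fun x => x) ↔
      n ∈ a ∨ n ∈ b := by
  rw [PySem.List.mem_sorted, PySem.Set.mem_union, PySem.Set.mem_ofList]

-- membership in the truthy-key set
theorem pvLive_mem (po : List (String × List (String × String))) (n : String) :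
    n ∈ PySem.Set.ofList (((PySem.Dict.mk po).keys).filter (fun n => pvTruthy (pvLook po n))) ↔
      n ∈ po.map (fun x => x.1) ∧ pvPt po n = true := by
  rw [PySem.Set.mem_ofList, List.mem_filter, PySem.Dict.keys_mk]
  exact Iff.rfl

theorem pvLive_nodup (po : List (String × List (String × String))) :
    (PySem.Set.ofList (((PySem.Dict.mk po).keys).filter (fun n => pvTruthy (pvLook po n)))).Nodup :=
  PySem.Set.nodup_ofList _

-- removed = sorted(prev_live - cur_live)
theorem pvE_removed (po co : List (String × List (String × String))) :
    PySem.List.sorted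
        (PySem.Set.diff
          (PySem.Set.ofList (((PySem.Dict.mk po).keys).filter (fun n => pvTruthy (pvLook po n))))
          (PySem.Set.ofList (((PySem.Dict.mk co).keys).filter (fun n => pvTruthy (pvLook co n)))))
        (fun x => x) =
      (PySem.List.sorted (PySem.Set.union (PySem.Set.ofList (po.map (fun x => x.1))) (co.map (fun x => x.1)))
          (fun x => x)).filter (fun n => pvPt po n && !pvPt co n) := by
  apply PySem.List.sorted_eq_of_perm_of_pairwise_lt
  · rw [List.perm_ext_iff_of_nodup (List.Nodup.filter _ (pvU_nodup _ _))
      (PySem.Set.nodup_diff _ _ (pvLive_nodup po))]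
    intro n
    rw [List.mem_filter, PySem.Set.mem_diff, pvLive_mem, pvLive_mem, pvU_mem]
    constructor
    · rintro ⟨_, h⟩
      simp only [Bool.and_eq_true, Bool.not_eq_true'] at h
      exact ⟨⟨pvPt_mem po n h.1, h.1⟩, fun hc => by simp [hc.2] at h⟩
    · rintro ⟨⟨hmem, hp⟩, hnc⟩
      refine ⟨Or.inl hmem, ?_⟩
      simp only [Bool.and_eq_true, Bool.not_eq_true']
      refine ⟨hp, ?_⟩
      by_cases hc : pvPt co n = true
      · exact absurd ⟨pvPt_mem co n hc, hc⟩ hnc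
      · simpa using hc
  · exact (pvU_pairwise _ _).filter _

-- sorted key union is symmetric in its two sides
theorem pvU_comm (a b : List String) :
    PySem.List.sorted (PySem.Set.union (PySem.Set.ofList a) b) (fun x => x) =
      PySem.List.sorted (PySem.Set.union (PySem.Set.ofList b) a) (fun x => x) := by
  have h1 : PySem.Set.union (PySem.Set.ofList a) b = PySem.Set.ofList (a ++ b) := by
    simp [PySem.Set.union, PySem.Set.ofList_append]
  have h2 : PySem.Set.union (PySem.Set.ofList b) a = PySem.Set.ofList (b ++ a) := by
    simp [PySem.Set.union, PySem.Set.ofList_append]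
  rw [h1, h2]
  apply PySem.List.sorted_eq_sorted_of_perm _ _ _ (fun x y h => h)
  rw [List.perm_ext_iff_of_nodup (PySem.Set.nodup_ofList _) (PySem.Set.nodup_ofList _)]
  intro n
  rw [PySem.Set.mem_ofList, PySem.Set.mem_ofList, List.mem_append, List.mem_append]
  exact Or.comm

-- added = sorted(cur_live - prev_live)
theorem pvE_added (po co : List (String × List (String × String))) :
    PySem.List.sorted
        (PySem.Set.diff
          (PySem.Set.ofList (((PySem.Dict.mk co).keys).filter (fun n => pvTruthy (pvLook co n))))
          (PySem.Set.ofList (((PySem.Dict.mk po).keys).filter (fun n => pvTruthy (pvLook po n)))))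
        (fun x => x) =
      (PySem.List.sorted (PySem.Set.union (PySem.Set.ofList (po.map (fun x => x.1))) (co.map (fun x => x.1)))
          (fun x => x)).filter (fun n => pvPt co n && !pvPt po n) := by
  rw [pvE_removed co po]
  congr 1
  exact pvU_comm _ _

-- common = sorted(prev_live & cur_live)
theorem pvE_common (po co : List (String × List (String × String))) :
    PySem.List.sorted
        (PySem.Set.inter
          (PySem.Set.ofList (((PySem.Dict.mk po).keys).filter (fun n => pvTruthy (pvLook po n))))
          (PySem.Set.ofList (((PySem.Dict.mk co).keys).filter (fun n => pvTruthy (pvLook co n)))))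
        (fun x => x) =
      (PySem.List.sorted (PySem.Set.union (PySem.Set.ofList (po.map (fun x => x.1))) (co.map (fun x => x.1)))
          (fun x => x)).filter (fun n => pvPt po n && pvPt co n) := by
  apply PySem.List.sorted_eq_of_perm_of_pairwise_lt
  · rw [List.perm_ext_iff_of_nodup (List.Nodup.filter _ (pvU_nodup _ _))
      (PySem.Set.nodup_inter _ _ (pvLive_nodup po))]
    intro n
    rw [List.mem_filter, PySem.Set.mem_inter, pvLive_mem, pvLive_mem, pvU_mem]
    constructor
    · rintro ⟨_, h⟩
      simp only [Bool.and_eq_true] at h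
      exact ⟨⟨pvPt_mem po n h.1, h.1⟩, ⟨pvPt_mem co n h.2, h.2⟩⟩
    · rintro ⟨⟨hmemp, hp⟩, ⟨_, hc⟩⟩
      exact ⟨Or.inl hmemp, by simp [hp, hc]⟩
  · exact (pvU_pairwise _ _).filter _

-- filtering the sorted intersection by a further test = one conjunctive filter of the union
theorem pvE_changed (po co : List (String × List (String × String))) (q : String → Bool) :
    (PySem.List.sorted (PySem.Set.union (PySem.Set.ofList (po.map (fun x => x.1))) (co.map (fun x => x.1)))
        (fun x => x)).filter (fun n => pvPt po n && pvPt co n && q n) =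
      (PySem.List.sorted
          (PySem.Set.inter
            (PySem.Set.ofList (((PySem.Dict.mk po).keys).filter (fun n => pvTruthy (pvLook po n))))
            (PySem.Set.ofList (((PySem.Dict.mk co).keys).filter (fun n => pvTruthy (pvLook co n)))))
          (fun x => x)).filter q := by
  rw [pvE_common, List.filter_filter]
  apply List.filter_congr
  intro n _
  cases hq : q n <;> cases h1 : pvPt po n <;> cases h2 : pvPt co n <;> simp [hq, h1, h2]

-- ===== VERDICT (by name: the statement is the Claim_ definition above) =====
theorem diff_ops_py_spec : Claim_equal_diff_ops_py := by
  intro prev cur _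
  show diff_ops_py prev cur = diff_ops_py_alt prev cur
  simp only [diff_ops_py, diff_ops_py_alt]
  rw [pvFoldA]
  rw [pvE_removed, pvE_added, pvE_changed, pvE_changed]
  simp [pvPt, pvQ, pvM]
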